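-- pv_equiv track=rewrite | github.com/carr91/UniversityCanterburyCourseSearch | MainV9.py | combine_courses_by_title_and_info
-- ===== SOURCE A (Python) =====
-- def combine_courses_by_title_and_info(course_data):
--     """Combine course codes and 'Other Info' for entries with the same title."""
--     combined_courses = {}
--
--     for course in course_data:
--         title = course[1]  # Use the Course Title as the key
--         if title in combined_courses:
--             # Combine course codes and 'Other Info' with a "/"
--             combined_courses[title][0] += f"/{course[0]}"
--             combined_courses[title][4] += f"/{course[4]}"
--         else:
--             # Add the course to the dictionary
--             combined_courses[title] = course[:]
--
--     # Return the combined courses as a list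
--     return list(combined_courses.values())
-- ===== SOURCE B (Python) =====
-- def combine_courses_by_title_and_info(course_data):
--     """Combine course codes and 'Other Info' for entries with the same title."""
--     # Pass 1: bucket the courses by title, keeping first-seen title order.
--     groups = {}
--     for course in course_data:
--         groups[course[1]] = groups.get(course[1], []) + [course]
--     # Pass 2: one combined row per bucket; codes and 'Other Info' joined with "/".
--     result = []
--     for group in groups.values():
--         if len(group) == 1:
--             result.append(group[0][:])
--         else:
--             merged = group[0][:]
--             merged[0] = "/".join(c[0] for c in group)
--             merged[4] = "/".join(c[4] for c in group)
--             result.append(merged)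
--     return result
-- ===== Notes on version B (the rewrite author's own statement) =====
-- stated objective: alternative
-- what changed: Replaces the single-pass if/else dict accumulator that string-appends into the stored row with a two-pass group-then-reduce: first bucket courses by title, then build each output row once by '/'-joining the codes and info of the whole bucket.
import Mathlib
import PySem

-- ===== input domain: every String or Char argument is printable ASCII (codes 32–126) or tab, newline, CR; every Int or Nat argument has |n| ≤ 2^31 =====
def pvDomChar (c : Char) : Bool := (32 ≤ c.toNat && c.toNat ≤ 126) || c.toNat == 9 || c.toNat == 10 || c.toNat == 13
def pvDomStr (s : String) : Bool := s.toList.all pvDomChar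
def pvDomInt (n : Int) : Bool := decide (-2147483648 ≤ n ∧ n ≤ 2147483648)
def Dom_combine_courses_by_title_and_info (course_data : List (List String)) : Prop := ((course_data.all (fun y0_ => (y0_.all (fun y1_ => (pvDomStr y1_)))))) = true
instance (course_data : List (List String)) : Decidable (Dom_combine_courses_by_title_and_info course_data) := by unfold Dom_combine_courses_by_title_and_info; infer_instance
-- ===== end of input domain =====

-- B replaces A's single-pass if/else dict accumulator (which string-appends into the stored row)
-- by a two-pass group-then-reduce: bucket courses by title, then build each output row once by
-- '/'-joining the codes and info of the whole bucket (objective: alternative decomposition).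

-- ===== PORT A =====
def combine_courses_by_title_and_info (course_data : List (List String)) : List (List String) :=
  let combined := course_data.foldl (fun d course =>
    let title := PySem.List.pyGetD course 1 ""             -- course[1] (IndexError excluded by Pre_)
    if d.contains title then                               -- title in combined_courses
      let row := d.getD title []
      let row := PySem.List.pySetD row 0
        (PySem.List.pyGetD row 0 "" ++ "/" ++ PySem.List.pyGetD course 0 "")   -- [0] += f"/{course[0]}"
      let row := PySem.List.pySetD row 4
        (PySem.List.pyGetD row 4 "" ++ "/" ++ PySem.List.pyGetD course 4 "")   -- [4] += f"/{course[4]}"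
      d.insert title row
    else
      d.insert title course                                -- combined_courses[title] = course[:]
    ) PySem.Dict.empty
  combined.values

-- ===== PORT B =====
def combine_courses_by_title_and_info_alt (course_data : List (List String)) : List (List String) :=
  -- pass 1: bucket by title (groups[course[1]] = groups.get(course[1], []) + [course])
  let groups := course_data.foldl (fun d course =>
    d.insert (PySem.List.pyGetD course 1 "")
      (d.getD (PySem.List.pyGetD course 1 "") [] ++ [course])) PySem.Dict.empty
  -- pass 2: one combined row per bucket
  groups.values.foldl (fun result group =>
    if group.length == 1 then
      result ++ [PySem.List.pyGetD group 0 []]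
    else
      let merged := PySem.List.pyGetD group 0 []
      let merged := PySem.List.pySetD merged 0
        (PySem.Str.join "/" (group.map (fun c => PySem.List.pyGetD c 0 "")))
      let merged := PySem.List.pySetD merged 4
        (PySem.Str.join "/" (group.map (fun c => PySem.List.pyGetD c 4 "")))
      result ++ [merged]) []

-- ===== PRECONDITION & SPEC =====
-- Pre_ excludes exactly the inputs on which A raises IndexError: a row shorter than 2 (course[1]),
-- or a row of a shared-title group (≥ 2 rows with that title) shorter than 5 (index 4 is combined).
def Pre_combine_courses_by_title_and_info (course_data : List (List String)) : Prop :=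
  ∀ c ∈ course_data, 2 ≤ c.length ∧
    (2 ≤ course_data.countP (fun c' => c'.getD 1 "" == c.getD 1 "") → 5 ≤ c.length)
instance (course_data : List (List String)) : Decidable (Pre_combine_courses_by_title_and_info course_data) := by
  unfold Pre_combine_courses_by_title_and_info; infer_instance
def pvWitness_combine_courses_by_title_and_info : List (List String) :=
  [["COSC101", "Intro", "15", "S1", "campus"], ["COSC102", "Intro", "15", "S2", "online"], ["MATH199", "Calc"]]

def Spec_combine_courses_by_title_and_info (course_data : List (List String)) (out : List (List String)) : Prop := out = combine_courses_by_title_and_info_alt course_data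
instance (course_data : List (List String)) (out : List (List String)) : Decidable (Spec_combine_courses_by_title_and_info course_data out) := by unfold Spec_combine_courses_by_title_and_info; infer_instance

-- ===== CLAIM (what is proved, stated in full; the proofs are below) =====
def Claim_equal_combine_courses_by_title_and_info : Prop := ∀ (course_data : List (List String)), Dom_combine_courses_by_title_and_info course_data → Pre_combine_courses_by_title_and_info course_data → Spec_combine_courses_by_title_and_info course_data (combine_courses_by_title_and_info course_data)

-- ===== LEMMAS AND PROOFS =====

-- proof-side names for the two loop bodies and the per-group reductions
def tKey (c : List String) : String := PySem.List.pyGetD c 1 ""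

def updA (row course : List String) : List String :=
  PySem.List.pySetD
    (PySem.List.pySetD row 0
      (PySem.List.pyGetD row 0 "" ++ "/" ++ PySem.List.pyGetD course 0 ""))
    4
    (PySem.List.pyGetD
      (PySem.List.pySetD row 0
        (PySem.List.pyGetD row 0 "" ++ "/" ++ PySem.List.pyGetD course 0 "")) 4 ""
      ++ "/" ++ PySem.List.pyGetD course 4 "")

def stepA (d : PySem.Dict String (List String)) (c : List String) : PySem.Dict String (List String) :=
  if d.contains (tKey c) then d.insert (tKey c) (updA (d.getD (tKey c) []) c)
  else d.insert (tKey c) c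

def stepB (d : PySem.Dict String (List (List String))) (c : List String) :
    PySem.Dict String (List (List String)) :=
  d.insert (tKey c) (d.getD (tKey c) [] ++ [c])

def reduceG : List (List String) → List String
  | [] => []
  | h :: r => r.foldl updA h

def mapD (d : PySem.Dict String (List (List String))) : PySem.Dict String (List String) :=
  PySem.Dict.mk (d.items.map (fun p => (p.1, reduceG p.2)))

def blendG (g : List (List String)) : List String :=
  if g.length == 1 then PySem.List.pyGetD g 0 []
  else
    PySem.List.pySetD
      (PySem.List.pySetD (PySem.List.pyGetD g 0 []) 0
        (PySem.Str.join "/" (g.map (fun c => PySem.List.pyGetD c 0 ""))))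
      4 (PySem.Str.join "/" (g.map (fun c => PySem.List.pyGetD c 4 "")))

lemma portA_eq (l : List (List String)) :
    combine_courses_by_title_and_info l = (l.foldl stepA PySem.Dict.empty).values := rfl

lemma portB_eq (l : List (List String)) :
    combine_courses_by_title_and_info_alt l =
      ((l.foldl stepB PySem.Dict.empty).values.map blendG) := by
  unfold combine_courses_by_title_and_info_alt
  have hfold : ∀ (gs : List (List (List String))) (acc : List (List String)),
      gs.foldl (fun result group =>
        if group.length == 1 then
          result ++ [PySem.List.pyGetD group 0 []]
        else
          result ++ [PySem.List.pySetD
            (PySem.List.pySetD (PySem.List.pyGetD group 0 []) 0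
              (PySem.Str.join "/" (group.map (fun c => PySem.List.pyGetD c 0 ""))))
            4 (PySem.Str.join "/" (group.map (fun c => PySem.List.pyGetD c 4 "")))]) acc
      = acc ++ gs.map blendG := by
    intro gs
    induction gs with
    | nil => simp
    | cons g gs ih =>
      intro acc
      simp only [List.foldl_cons, ih, List.map_cons, blendG]
      split <;> simp
  rw [hfold]
  rfl

lemma contains_mapD (d : PySem.Dict String (List (List String))) (k : String) :
    (mapD d).contains k = d.contains k := by
  simp [mapD, PySem.Dict.contains, List.any_map, Function.comp_def]

lemma get?_mapD (d : PySem.Dict String (List (List String))) (k : String) :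
    (mapD d).get? k = (d.get? k).map reduceG := by
  simp only [mapD, PySem.Dict.get?]
  induction d.items with
  | nil => rfl
  | cons p rest ih =>
    by_cases h : p.1 == k
    · simp [List.find?, h]
    · simp only [List.map_cons, List.find?] at *
      simp [h] at *
      exact ih

lemma insert_mapD (d : PySem.Dict String (List (List String))) (k : String) (v : List (List String)) :
    (mapD d).insert k (reduceG v) = mapD (d.insert k v) := by
  simp only [PySem.Dict.insert, contains_mapD]
  by_cases h : d.contains k
  · simp only [h, if_true, mapD, List.map_map]
    congr 1
    apply List.map_congr_left
    intro p _
    by_cases hp : p.1 = k <;> simp [hp]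
  · simp only [h, Bool.false_eq_true, if_false, mapD]
    simp

lemma getD_of_contains_values (d : PySem.Dict String (List (List String))) (k : String)
    (hc : d.contains k = true) :
    d.getD k [] ∈ d.values ∧ d.get? k = some (d.getD k []) := by
  rw [PySem.Dict.contains_eq_isSome_get?] at hc
  obtain ⟨v, hv⟩ := Option.isSome_iff_exists.mp hc
  have hg := PySem.Dict.getD_of_get?_eq_some (d := d) ([] : List (List String)) hv
  refine ⟨?_, by rw [hg]; exact hv⟩
  have hm := PySem.Dict.mem_items_of_get?_eq_some (d := d) hv
  rw [hg]
  exact List.mem_map.mpr ⟨(k, v), hm, rfl⟩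

lemma main_fold (l : List (List String)) :
    ∀ (d : PySem.Dict String (List (List String))),
      (∀ v ∈ d.values, v ≠ []) →
      l.foldl stepA (mapD d) = mapD (l.foldl stepB d) := by
  induction l with
  | nil => intro d _; rfl
  | cons c rest ih =>
    intro d hne
    have hstep : stepA (mapD d) c = mapD (stepB d c) := by
      unfold stepA stepB
      rw [contains_mapD]
      by_cases hc : d.contains (tKey c)
      · simp only [hc, if_true]
        obtain ⟨hmem, hget⟩ := getD_of_contains_values d (tKey c) hc
        have hDne : d.getD (tKey c) [] ≠ [] := hne _ hmem
        have hgd : (mapD d).getD (tKey c) [] = reduceG (d.getD (tKey c) []) := by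
          apply PySem.Dict.getD_of_get?_eq_some
          rw [get?_mapD, hget]; rfl
        rw [hgd]
        have hred : updA (reduceG (d.getD (tKey c) [])) c = reduceG (d.getD (tKey c) [] ++ [c]) := by
          obtain ⟨h, r, hr⟩ : ∃ h r, d.getD (tKey c) [] = h :: r := by
            cases hEq : d.getD (tKey c) [] with
            | nil => exact absurd hEq hDne
            | cons h r => exact ⟨h, r, rfl⟩
          rw [hr]
          simp [reduceG, List.foldl_append]
        rw [hred, insert_mapD]
      · simp only [hc, Bool.false_eq_true, if_false]
        rw [PySem.Dict.getD_of_not_contains d _ (by simpa using hc)]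
        rw [← insert_mapD]
        rfl
    simp only [List.foldl_cons, hstep]
    apply ih
    intro v hv
    unfold stepB at hv
    rcases PySem.Dict.mem_values_insert _ _ _ _ hv with h | h
    · rw [h]; simp
    · exact hne _ h

lemma values_nonempty (l : List (List String)) :
    ∀ (d : PySem.Dict String (List (List String))),
      (∀ v ∈ d.values, v ≠ []) →
      ∀ v ∈ (l.foldl stepB d).values, v ≠ [] := by
  induction l with
  | nil => intro d h; exact h
  | cons c rest ih =>
    intro d hne
    apply ih
    intro v hv
    unfold stepB at hv
    rcases PySem.Dict.mem_values_insert _ _ _ _ hv with h | h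
    · rw [h]; simp
    · exact hne _ h

lemma getD_foldl_stepB (l : List (List String)) :
    ∀ (d : PySem.Dict String (List (List String))) (k : String),
      (l.foldl stepB d).getD k [] = d.getD k [] ++ l.filter (fun c => tKey c == k) := by
  induction l with
  | nil => intro d k; simp
  | cons c rest ih =>
    intro d k
    simp only [List.foldl_cons, ih, List.filter_cons]
    unfold stepB
    rw [PySem.Dict.getD_insert]
    by_cases h : tKey c == k
    · have hk : k = tKey c := (beq_iff_eq.mp h).symm
      simp [hk]
    · have hk : ¬ (k = tKey c) := fun he => h (beq_iff_eq.mpr he.symm)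
      simp [h, hk]

lemma nodup_keys_foldl_stepB (l : List (List String)) :
    (l.foldl stepB PySem.Dict.empty).keys.Nodup := by
  have : l.foldl stepB PySem.Dict.empty
      = l.foldl (fun d c => d.insert (tKey c) (d.getD (tKey c) [] ++ [c])) PySem.Dict.empty := rfl
  rw [this]
  exact PySem.Dict.nodup_keys_foldl_insert_key l tKey _ _ PySem.Dict.nodup_keys_empty

-- '/'-join over a snoc, on the char-list side then on strings
lemma chars_join_snoc (sep x : List Char) :
    ∀ (l : List (List Char)), l ≠ [] →
      PySem.Chars.join sep (l ++ [x]) = PySem.Chars.join sep l ++ sep ++ x := by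
  intro l
  induction l with
  | nil => intro h; exact absurd rfl h
  | cons a t ih =>
    intro _
    cases t with
    | nil => simp [PySem.Chars.join_cons_cons, PySem.Chars.join_singleton]
    | cons b u =>
      have := ih (by simp)
      simp only [List.cons_append, PySem.Chars.join_cons_cons] at *
      rw [this]
      simp

lemma str_join_snoc (x : String) (l : List String) (h : l ≠ []) :
    PySem.Str.join "/" (l ++ [x]) = PySem.Str.join "/" l ++ "/" ++ x := by
  apply String.toList_injective
  rw [PySem.Str.toList_join]
  simp only [String.toList_append, PySem.Str.toList_join, List.map_append, List.map_cons,
    List.map_nil]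
  rw [chars_join_snoc _ _ _ (by simpa using h)]

lemma str_join_singleton (x : String) : PySem.Str.join "/" [x] = x := by
  apply String.toList_injective
  rw [PySem.Str.toList_join]
  simp [PySem.Chars.join_singleton]

lemma pySetD_eq_set (xs : List String) (k : Nat) (v : String) (h : k < xs.length) :
    PySem.List.pySetD xs (k : Int) v = xs.set k v := by
  have hidx : PySem.List.pyIdx? xs.length (k : Int) = some k := by
    unfold PySem.List.pyIdx?
    rw [if_pos (by omega : (0 : Int) ≤ (k : Int)), if_pos (by exact_mod_cast h)]
    simp
  simp [PySem.List.pySetD, PySem.List.pySet?, hidx]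

lemma pySetD0 (xs : List String) (v : String) (h : 0 < xs.length) :
    PySem.List.pySetD xs (0 : Int) v = xs.set 0 v := by
  have c : ((0 : Int)) = ((0 : Nat) : Int) := rfl
  rw [c, pySetD_eq_set _ _ _ h]

lemma pySetD4 (xs : List String) (v : String) (h : 4 < xs.length) :
    PySem.List.pySetD xs (4 : Int) v = xs.set 4 v := by
  have c : ((4 : Int)) = ((4 : Nat) : Int) := rfl
  rw [c, pySetD_eq_set _ _ _ h]

lemma pyGetD_eq_getD (xs : List String) (k : Nat) :
    PySem.List.pyGetD xs (k : Int) "" = xs.getD k "" := by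
  simp [PySem.List.pyGetD_natCast, List.getD_eq_getElem?_getD]

lemma pyGetD0 (xs : List String) : PySem.List.pyGetD xs (0 : Int) "" = xs.getD 0 "" := by
  have c : ((0 : Int)) = ((0 : Nat) : Int) := rfl
  rw [c, pyGetD_eq_getD]

lemma pyGetD1 (xs : List String) : PySem.List.pyGetD xs (1 : Int) "" = xs.getD 1 "" := by
  have c : ((1 : Int)) = ((1 : Nat) : Int) := rfl
  rw [c, pyGetD_eq_getD]

lemma pyGetD4 (xs : List String) : PySem.List.pyGetD xs (4 : Int) "" = xs.getD 4 "" := by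
  have c : ((4 : Int)) = ((4 : Nat) : Int) := rfl
  rw [c, pyGetD_eq_getD]

lemma getD_set_same (xs : List String) (k : Nat) (v : String) (h : k < xs.length) :
    (xs.set k v).getD k "" = v := by
  rw [List.getD_eq_getElem?_getD, List.getElem?_set_self h]
  rfl

lemma getD_set_other (xs : List String) (j k : Nat) (v : String) (h : j ≠ k) :
    (xs.set j v).getD k "" = xs.getD k "" := by
  rw [List.getD_eq_getElem?_getD, List.getElem?_set_ne h, ← List.getD_eq_getElem?_getD]

lemma set_getD_self (xs : List String) (k : Nat) (h : k < xs.length) :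
    xs.set k (xs.getD k "") = xs := by
  rw [List.getD_eq_getElem?_getD, List.getElem?_eq_getElem h, Option.getD_some,
    List.set_getElem_self]

-- the heart: A's sequential += reduction of a bucket equals one '/'-join over the bucket
lemma reduce_eq_join (h : List String) (hlen : 5 ≤ h.length) :
    ∀ (r : List (List String)),
      r.foldl updA h =
        (h.set 0 (PySem.Str.join "/" ((h :: r).map (fun c => PySem.List.pyGetD c 0 "")))).set 4
          (PySem.Str.join "/" ((h :: r).map (fun c => PySem.List.pyGetD c 4 ""))) := by
  intro r
  induction r using List.reverseRecOn with
  | nil =>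
    simp only [List.foldl_nil, List.map_cons, List.map_nil]
    rw [pyGetD0, pyGetD4, str_join_singleton, str_join_singleton]
    rw [set_getD_self _ 0 (by omega), set_getD_self _ 4 (by omega)]
  | append_singleton r c ih =>
    rw [List.foldl_append, List.foldl_cons, List.foldl_nil, ih]
    have hne : (h :: r).map (fun c => PySem.List.pyGetD c 0 "") ≠ [] := by simp
    have hne4 : (h :: r).map (fun c => PySem.List.pyGetD c 4 "") ≠ [] := by simp
    have hm0 : ((h :: (r ++ [c])).map (fun c => PySem.List.pyGetD c 0 ""))
        = ((h :: r).map (fun c => PySem.List.pyGetD c 0 "")) ++ [PySem.List.pyGetD c 0 ""] := by simp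
    have hm4 : ((h :: (r ++ [c])).map (fun c => PySem.List.pyGetD c 4 ""))
        = ((h :: r).map (fun c => PySem.List.pyGetD c 4 "")) ++ [PySem.List.pyGetD c 4 ""] := by simp
    rw [hm0, hm4, str_join_snoc _ _ hne, str_join_snoc _ _ hne4]
    set J0 := PySem.Str.join "/" ((h :: r).map (fun c => PySem.List.pyGetD c 0 "")) with hJ0
    set J4 := PySem.Str.join "/" ((h :: r).map (fun c => PySem.List.pyGetD c 4 "")) with hJ4
    unfold updA
    have hl1 : ((h.set 0 J0).set 4 J4).length = h.length := by simp
    have g0 : PySem.List.pyGetD ((h.set 0 J0).set 4 J4) 0 "" = J0 := by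
      rw [pyGetD0]
      rw [getD_set_other _ 4 0 _ (by omega), getD_set_same _ 0 _ (by omega)]
    rw [g0]
    rw [pySetD0 _ _ (by simp only [List.length_set]; omega)]
    have g4 : PySem.List.pyGetD (((h.set 0 J0).set 4 J4).set 0 (J0 ++ "/" ++ PySem.List.pyGetD c 0 "")) 4 "" = J4 := by
      rw [pyGetD4]
      rw [getD_set_other _ 0 4 _ (by omega), getD_set_same _ 4 _ (by simp only [List.length_set]; omega)]
    rw [g4]
    rw [pySetD4 _ _ (by simp only [List.length_set]; omega)]
    rw [List.set_comm J4 _ (by omega : (4 : Nat) ≠ 0), List.set_set, List.set_set]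

-- every final bucket reduces (A-style) to its blended (B-style) row, under Pre_
lemma reduce_eq_blend (l : List (List String))
    (hpre : Pre_combine_courses_by_title_and_info l) :
    ∀ g ∈ (l.foldl stepB PySem.Dict.empty).values, reduceG g = blendG g := by
  intro g hg
  obtain ⟨⟨k, g'⟩, hmem, hsnd⟩ := List.mem_map.mp hg
  simp only at hsnd
  subst hsnd
  have hnd := nodup_keys_foldl_stepB l
  have hgd := PySem.Dict.getD_of_mem_items _ hmem hnd ([] : List (List String))
  have hempty : (PySem.Dict.empty : PySem.Dict String (List (List String))).getD k [] = [] := rfl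
  have hfil : g' = l.filter (fun c => tKey c == k) := by
    rw [← hgd, getD_foldl_stepB, hempty, List.nil_append]
  have hne : g' ≠ [] := by
    apply values_nonempty l PySem.Dict.empty (by simp [PySem.Dict.values, PySem.Dict.empty])
    exact hg
  obtain ⟨h, r, hr⟩ : ∃ h r, g' = h :: r := by
    cases g' with
    | nil => exact absurd rfl hne
    | cons h r => exact ⟨h, r, rfl⟩
  by_cases hone : r = []
  · subst hone; subst hr
    simp [reduceG, blendG, PySem.List.pyGetD]
  · -- bucket of size ≥ 2: its first row has length ≥ 5 by Pre_
    have hhl : 5 ≤ h.length := by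
      have hhmem : h ∈ l.filter (fun c => tKey c == k) := by rw [← hfil, hr]; simp
      have hhk : tKey h = k := beq_iff_eq.mp (List.mem_filter.mp hhmem).2
      have hhin : h ∈ l := (List.mem_filter.mp hhmem).1
      have hk' : h.getD 1 "" = k := by
        rw [← hhk]
        show h.getD 1 "" = tKey h
        rw [tKey, pyGetD1]
      have hcount : 2 ≤ l.countP (fun c' => c'.getD 1 "" == h.getD 1 "") := by
        have hsame : (fun c' => c'.getD 1 "" == h.getD 1 "") = (fun c => tKey c == k) := by
          funext c'
          have ht : tKey c' = c'.getD 1 "" := by rw [tKey, pyGetD1]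
          rw [hk', ht]
        rw [hsame, List.countP_eq_length_filter, ← hfil, hr]
        cases r with
        | nil => exact absurd rfl hone
        | cons _ _ => simp
      exact (hpre h hhin).2 hcount
    subst hr
    have hlen2 : ¬ ((h :: r).length == 1) = true := by
      cases r with
      | nil => exact absurd rfl hone
      | cons _ _ => simp
    unfold blendG
    rw [if_neg hlen2]
    simp only [reduceG]
    rw [reduce_eq_join h hhl r]
    have hget : PySem.List.pyGetD (h :: r) 0 ([] : List String) = h := by
      simp [PySem.List.pyGetD]
    rw [hget]
    rw [pySetD0 _ _ (by omega), pySetD4 _ _ (by simp only [List.length_set]; omega)]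

-- ===== VERDICT (by name: the statement is the Claim_ definition above) =====
theorem combine_courses_by_title_and_info_spec : Claim_equal_combine_courses_by_title_and_info := by
  intro l _hdom hpre
  unfold Spec_combine_courses_by_title_and_info
  rw [portA_eq, portB_eq]
  have hempty : (PySem.Dict.empty : PySem.Dict String (List String)) = mapD PySem.Dict.empty := rfl
  rw [hempty, main_fold l PySem.Dict.empty (by simp [PySem.Dict.values, PySem.Dict.empty])]
  have hvals : (mapD (l.foldl stepB PySem.Dict.empty)).values
      = (l.foldl stepB PySem.Dict.empty).values.map reduceG := by
    simp [mapD, PySem.Dict.values, List.map_map]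
  rw [hvals]
  exact List.map_congr_left (reduce_eq_blend l hpre)
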